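-- pv_equiv track=rewrite | github.com/hashcloak/narcos | candidates/alpha/sage/tnfs/simul/polyselect_utils.py | divide_degree_by_d
-- ===== SOURCE A (Python) =====
-- def divide_degree_by_d(coeffs_poly, d, u):
--     """ input: an array of coefficients of a univariate polynomial p
--     returns a list of coefficients of a polynomial P of degree deg/d such that P(u^d) = p(u)
--     """
--     m = len(coeffs_poly)
--     cP = [0]*(((m-1) // d) +1)
--     j=0
--     while d*j < m:
--         i=0
--         while (i < d) and (d*j+i < m):
--             cP[j] += coeffs_poly[d*j+i]*u**i
--             i+=1
--         j += 1
--     return cP, [-u**d, 1]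
-- ===== SOURCE B (Python) =====
-- def divide_degree_by_d(coeffs_poly, d, u):
--     """ input: an array of coefficients of a univariate polynomial p
--     returns a list of coefficients of a polynomial P of degree deg/d such that P(u^d) = p(u)
--     """
--     m = len(coeffs_poly)
--     cP = []
--     for j in range((m + d - 1) // d):
--         acc = 0
--         top = min(d, m - d * j)
--         for i in reversed(range(top)):
--             acc = acc * u + coeffs_poly[d * j + i]
--         cP.append(acc)
--     return cP, [-u**d, 1]
-- ===== Notes on version B (the rewrite author's own statement) =====
-- stated objective: idiomatic
-- what changed: B evaluates each block of d coefficients with Horner's method (descending in-block index, acc = acc*u + c) and builds cP by appending block values, instead of A's preallocated zero list updated in place by ascending-index accumulation of c*u**i with repeated exponentiation.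
-- outside the precondition, e.g. on divide_degree_by_d([], -1, 2): A returns ([0, 0], [-0.5, 1]), B returns ([0, 0], [-0.5, 1])
import Mathlib
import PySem

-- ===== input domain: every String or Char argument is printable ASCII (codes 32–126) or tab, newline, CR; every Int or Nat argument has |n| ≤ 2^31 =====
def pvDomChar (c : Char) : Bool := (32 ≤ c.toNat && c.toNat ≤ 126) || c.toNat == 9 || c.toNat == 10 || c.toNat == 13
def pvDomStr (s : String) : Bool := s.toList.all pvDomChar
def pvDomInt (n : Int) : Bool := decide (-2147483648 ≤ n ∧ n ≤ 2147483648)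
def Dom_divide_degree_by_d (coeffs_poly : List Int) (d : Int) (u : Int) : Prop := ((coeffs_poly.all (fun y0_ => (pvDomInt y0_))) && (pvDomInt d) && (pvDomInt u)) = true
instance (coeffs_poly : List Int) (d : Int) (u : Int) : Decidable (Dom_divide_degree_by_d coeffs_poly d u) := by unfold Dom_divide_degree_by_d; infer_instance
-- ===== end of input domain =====

-- B replaces A's per-term c*u**i accumulation into a preallocated zero list by per-block
-- Horner evaluation appended to a growing list (more idiomatic; return value only, no mutation observable).

-- ===== PORT A =====
-- inner while: cP[j] += coeffs_poly[d*j+i]*u**i; i += 1   (fuel bounds the iteration count; the loop stops by its condition)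
def aInner (coeffs : List Int) (d m j u : Int) : Nat → Int → List Int → List Int
  | 0, _, cP => cP
  | fuel+1, i, cP =>
    if i < d ∧ d*j + i < m then
      aInner coeffs d m j u fuel (i+1)
        (PySem.List.pySetD cP j (PySem.List.pyGetD cP j 0 + (PySem.List.pyGetD coeffs (d*j+i) 0) * u ^ i.toNat))
    else cP

-- outer while: while d*j < m
def aOuter (coeffs : List Int) (d m u : Int) : Nat → Int → List Int → List Int
  | 0, _, cP => cP
  | fuel+1, j, cP =>
    if d*j < m then
      aOuter coeffs d m u fuel (j+1) (aInner coeffs d m j u d.toNat 0 cP)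
    else cP

def divide_degree_by_d (coeffs_poly : List Int) (d : Int) (u : Int) : List Int × List Int :=
  let m : Int := coeffs_poly.length
  let cP : List Int := List.replicate ((PySem.Int.floordiv (m-1) d) + 1).toNat 0
  (aOuter coeffs_poly d m u m.toNat 0 cP, [-(u ^ d.toNat), 1])

-- ===== PORT B =====
-- Horner over the block j: for i in reversed(range(top)): acc = acc*u + coeffs_poly[d*j+i]
def bBlock (coeffs : List Int) (d u : Int) (m : Int) (j : Int) : Int :=
  let top := min d (m - d*j)
  ((PySem.List.pyRange 0 top 1).reverse).foldl
    (fun acc i => acc * u + PySem.List.pyGetD coeffs (d*j + i) 0) 0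

def divide_degree_by_d_alt (coeffs_poly : List Int) (d : Int) (u : Int) : List Int × List Int :=
  let m : Int := coeffs_poly.length
  let cP := (PySem.List.pyRange 0 (PySem.Int.floordiv (m + d - 1) d) 1).foldl
    (fun cP j => cP ++ [bBlock coeffs_poly d u m j]) []
  (cP, [-(u ^ d.toNat), 1])

-- ===== PRECONDITION & SPEC =====
-- Pre_ excludes d ≤ 0: there A divides by zero (d = 0), loops forever (d < 0, nonempty list),
-- or returns a float in the second component (d < 0, empty list) — never an int-typed value.
def Pre_divide_degree_by_d (coeffs_poly : List Int) (d : Int) (u : Int) : Prop := 1 ≤ d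
instance (coeffs_poly : List Int) (d : Int) (u : Int) : Decidable (Pre_divide_degree_by_d coeffs_poly d u) := by unfold Pre_divide_degree_by_d; infer_instance
def pvWitness_divide_degree_by_d : List Int × Int × Int := ([1, 2, 3, 4, 5], 2, 3)

def Spec_divide_degree_by_d (coeffs_poly : List Int) (d : Int) (u : Int) (out : List Int × List Int) : Prop := out = divide_degree_by_d_alt coeffs_poly d u
instance (coeffs_poly : List Int) (d : Int) (u : Int) (out : List Int × List Int) : Decidable (Spec_divide_degree_by_d coeffs_poly d u out) := by unfold Spec_divide_degree_by_d; infer_instance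

-- ===== CLAIM (what is proved, stated in full; the proofs are below) =====
def Claim_equal_divide_degree_by_d : Prop := ∀ (coeffs_poly : List Int) (d : Int) (u : Int), Dom_divide_degree_by_d coeffs_poly d u → Pre_divide_degree_by_d coeffs_poly d u → Spec_divide_degree_by_d coeffs_poly d u (divide_degree_by_d coeffs_poly d u)

-- ===== LEMMAS AND PROOFS =====

-- block partial sum: bs t = sum over k < t of coeffs[d*j+k] * u^k
def bs (coeffs : List Int) (d u j : Int) : Nat → Int
  | 0 => 0
  | t+1 => bs coeffs d u j t + (PySem.List.pyGetD coeffs (d*j + (t:Int)) 0) * u ^ t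

-- B side: the Horner fold over reversed(range(t)) computes acc * u^t + bs t
theorem bHorner (coeffs : List Int) (d u j : Int) (t : Nat) : ∀ (acc : Int),
    ((PySem.List.pyRange 0 (t:Int) 1).reverse).foldl
      (fun acc i => acc * u + PySem.List.pyGetD coeffs (d*j + i) 0) acc
    = acc * u ^ t + bs coeffs d u j t := by
  induction t with
  | zero => intro acc; simp [bs]
  | succ t ih =>
    intro acc
    have h : PySem.List.pyRange 0 ((t:Int)+1) 1 = PySem.List.pyRange 0 (t:Int) 1 ++ [(t:Int)] :=
      PySem.List.pyRange_one_succ_right (by positivity)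
    push_cast
    rw [h, List.reverse_append, List.reverse_singleton, List.singleton_append, List.foldl_cons, ih]
    simp [bs]; ring

-- A side: pure-accumulator reading of the inner while loop
def aAcc (coeffs : List Int) (d m j u : Int) : Nat → Int → Int → Int
  | 0, _, acc => acc
  | fuel+1, i, acc =>
    if i < d ∧ d*j + i < m then
      aAcc coeffs d m j u fuel (i+1) (acc + (PySem.List.pyGetD coeffs (d*j+i) 0) * u ^ i.toNat)
    else acc

-- bridge: the inner loop only rewrites slot j, following aAcc
theorem aInner_eq_set (coeffs : List Int) (d m j u : Int) (hj : 0 ≤ j)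
    (fuel : Nat) : ∀ (i : Int) (cP : List Int), j.toNat < cP.length →
    aInner coeffs d m j u fuel i cP
      = cP.set j.toNat (aAcc coeffs d m j u fuel i (cP.getD j.toNat 0)) := by
  induction fuel with
  | zero =>
    intro i cP hlen
    rw [aInner, aAcc, List.getD_eq_getElem _ _ hlen, List.set_getElem_self]
  | succ fuel ih =>
    intro i cP hlen
    rw [aInner, aAcc]
    by_cases hc : i < d ∧ d*j + i < m
    · simp only [if_pos hc]
      rw [PySem.List.pySetD_of_nonneg _ _ hj,
          PySem.List.pyGetD_eq_getElem _ _ hj (by exact_mod_cast by omega),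
          ih _ _ (by simpa using hlen), List.set_set]
      congr 2
      rw [List.getD_eq_getElem _ _ hlen, List.getD_eq_getElem _ _ (by simpa using hlen),
          List.getElem_set_self]
    · rw [if_neg hc, if_neg hc, List.getD_eq_getElem _ _ hlen, List.set_getElem_self]

-- the accumulator gains exactly the block tail sum
theorem aAcc_bs (coeffs : List Int) (d m j u : Int)
    (n : Nat) : ∀ (fuel : Nat) (i acc : Int), n ≤ fuel → 0 ≤ i →
    i + (n:Int) = min d (m - d*j) →
    aAcc coeffs d m j u fuel i acc
      = acc + (bs coeffs d u j (i + (n:Int)).toNat - bs coeffs d u j i.toNat) := by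
  induction n with
  | zero =>
    intro fuel i acc _ hi hstop
    have hc : ¬ (i < d ∧ d*j + i < m) := by
      push_cast at hstop
      omega
    cases fuel with
    | zero => simp [aAcc]
    | succ f => simp [aAcc, hc]
  | succ n ih =>
    intro fuel i acc hfuel hi hstop
    have hc : i < d ∧ d*j + i < m := by
      push_cast at hstop; omega
    cases fuel with
    | zero => omega
    | succ f =>
      rw [aAcc, if_pos hc, ih f (i+1) _ (by omega) (by omega) (by push_cast at hstop ⊢; omega)]
      have h1 : (i+1).toNat = i.toNat + 1 := by omega
      have h2 : ((i + 1) + (n:Int)).toNat = (i + ((n:Nat)+1:Int)).toNat := by omega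
      rw [h2, h1, bs]
      have h3 : ((i.toNat : Int)) = i := by omega
      rw [h3]
      push_cast
      ring

-- the outer loop fills the remaining zero slots with the block values
theorem aOuter_eq (coeffs : List Int) (d m u : Int) (hd : 1 ≤ d)
    (n : Nat) : ∀ (fuel : Nat) (j : Int) (pre : List Int), n ≤ fuel → 0 ≤ j → pre.length = j.toNat →
    j + (n:Int) = PySem.Int.floordiv (m-1) d + 1 →
    aOuter coeffs d m u fuel j (pre ++ List.replicate n 0)
      = pre ++ (List.range n).map
          (fun (k : Nat) => bs coeffs d u (j + (k:Int)) (min d (m - d*(j + (k:Int)))).toNat) := by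
  have key : ∀ x : Int, d*x < m ↔ x ≤ PySem.Int.floordiv (m-1) d := by
    intro x
    rw [PySem.Int.le_floordiv_iff_mul_le (by omega)]
    constructor <;> intro h <;> nlinarith
  induction n with
  | zero =>
    intro fuel j pre _ hj hpre hstop
    have hc : ¬ d*j < m := by rw [key]; push_cast at hstop; omega
    cases fuel with
    | zero => simp [aOuter]
    | succ f => simp [aOuter, hc]
  | succ n ih =>
    intro fuel j pre hfuel hj hpre hstop
    have hc : d*j < m := by rw [key]; push_cast at hstop; omega
    have hstop' : 1 ≤ min d (m - d*j) := by omega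
    cases fuel with
    | zero => omega
    | succ f =>
      rw [aOuter, if_pos hc, List.replicate_succ,
          aInner_eq_set coeffs d m j u hj _ _ _ (by simp [hpre])]
      have hget : (pre ++ 0 :: List.replicate n 0).getD j.toNat 0 = 0 := by
        rw [List.getD_eq_getElem?_getD, List.getElem?_append_right (by omega)]
        simp [hpre]
      have hacc : aAcc coeffs d m j u d.toNat 0 0
          = bs coeffs d u j (min d (m - d*j)).toNat := by
        rw [aAcc_bs coeffs d m j u (min d (m - d*j)).toNat d.toNat 0 0 (by omega) le_rfl
            (by omega)]
        have : ((0:Int) + ((min d (m - d*j)).toNat : Int)).toNat = (min d (m - d*j)).toNat := by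
          omega
        rw [this]
        simp [bs]
      rw [hget, hacc, List.set_append_right _ _ (by omega), hpre, Nat.sub_self,
          List.set_cons_zero]
      have hcons : pre ++ bs coeffs d u j (min d (m - d*j)).toNat :: List.replicate n 0
          = (pre ++ [bs coeffs d u j (min d (m - d*j)).toNat]) ++ List.replicate n 0 := by
        simp
      rw [hcons, ih f (j+1) _ (by omega) (by omega) (by simp [hpre]; omega)
          (by push_cast at hstop ⊢; omega)]
      rw [List.range_succ_eq_map, List.map_cons, List.map_map]
      simp only [Nat.cast_zero, add_zero, List.append_assoc, List.cons_append]
      congr 2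
      apply List.map_congr_left
      intro k _
      simp only [Function.comp_apply, Nat.succ_eq_add_one, Nat.cast_add, Nat.cast_one]
      have harg : j + 1 + (k:Int) = j + ((k:Int) + 1) := by ring
      rw [harg]

-- ===== VERDICT (by name: the statement is the Claim_ definition above) =====
theorem divide_degree_by_d_spec : Claim_equal_divide_degree_by_d := by
  unfold Claim_equal_divide_degree_by_d
  intro coeffs d u _ hPre
  unfold Pre_divide_degree_by_d at hPre
  unfold Spec_divide_degree_by_d divide_degree_by_d divide_degree_by_d_alt
  simp only []
  set m : Int := (coeffs.length : Int) with hm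
  have hm0 : 0 ≤ m := by positivity
  have hd' : (0:Int) < d := by omega
  set fd : Int := PySem.Int.floordiv (m-1) d with hfd
  have hN0 : -1 ≤ fd := by
    rw [hfd, PySem.Int.le_floordiv_iff_mul_le hd']
    nlinarith
  have hNm : fd < m := by
    rw [hfd, PySem.Int.floordiv_lt_iff_lt_mul hd']
    nlinarith
  have hkey : ∀ x : Int, d*x < m ↔ x ≤ fd := by
    intro x
    rw [hfd, PySem.Int.le_floordiv_iff_mul_le hd']
    constructor <;> intro h <;> nlinarith
  -- A side
  have hArep : List.replicate (fd + 1).toNat 0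
      = ([] : List Int) ++ List.replicate (fd + 1).toNat 0 := by simp
  rw [hArep, aOuter_eq coeffs d m u hPre (fd + 1).toNat m.toNat 0 [] (by omega) le_rfl rfl
      (by omega)]
  -- B side
  have hNB : PySem.Int.floordiv (m + d - 1) d = fd + 1 := by
    have h1 : m + d - 1 = (m - 1) + 1 * d := by ring
    rw [h1, hfd, PySem.Int.floordiv_eq_ediv_of_pos hd', PySem.Int.floordiv_eq_ediv_of_pos hd',
      Int.add_mul_ediv_right _ _ (by omega)]
  rw [hNB, PySem.List.foldl_append_singleton_eq_map, PySem.List.pyRange_one]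
  simp only [List.nil_append, sub_zero, List.map_map, Function.comp_def]
  congr 1
  apply List.map_congr_left
  intro k hk
  have hk' : (k:Int) ≤ fd := by
    have := List.mem_range.mp hk
    omega
  have htop : 1 ≤ min d (m - d*(k:Int)) := by
    have := (hkey (k:Int)).mpr hk'
    omega
  unfold bBlock
  simp only [zero_add]
  have hcast : min d (m - d*(k:Int)) = (((min d (m - d*(k:Int))).toNat : Nat) : Int) := by omega
  rw [hcast, bHorner coeffs d u (k:Int) _ 0]
  simp
  congr 1
  omega
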